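-- pv_equiv track=rewrite | github.com/yue-zhongqi/earl | verl/utils/reward_score/sorting.py | minimal_swaps_from_to
-- ===== SOURCE A (Python) =====
-- def minimal_swaps_from_to(src, dst):
--     # dst is sorted(src) with stable tie-breaking
--     # build mapping from src indices to dst indices (handle duplicates stably)
--     from collections import defaultdict, deque
--     pos = defaultdict(deque)
--     for i, v in enumerate(dst):
--         pos[v].append(i)
--     perm = [None]*len(src)
--     for i, v in enumerate(src):
--         perm[i] = pos[v].popleft()
--     # count cycles in permutation 'perm'
--     n = len(src); seen = [False]*n; cycles = 0
--     for i in range(n):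
--         if not seen[i]:
--             cycles += 1
--             j = i
--             while not seen[j]:
--                 seen[j] = True
--                 j = perm[j]
--     return n - cycles   # S_min
-- ===== SOURCE B (Python) =====
-- def minimal_swaps_from_to(src, dst):
--     # Cycle-leader counting: no seen[] array; an index i is the leader of its
--     # cycle iff walking perm from i meets no index smaller than i before
--     # returning to i.  Answer = n - (number of leaders) = n - (number of cycles).
--     n = len(src)
--     pos = {}
--     for i, v in enumerate(dst):
--         pos.setdefault(v, []).append(i)
--     nxt = {}
--     perm = []
--     for v in src:
--         k = nxt.get(v, 0)
--         nxt[v] = k + 1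
--         perm.append(pos[v][k])
--     swaps = n
--     for i in range(n):
--         j = perm[i]
--         while j > i:
--             j = perm[j]
--         if j == i:
--             swaps -= 1
--     return swaps
-- ===== Notes on version B (the rewrite author's own statement) =====
-- stated objective: alternative
-- what changed: The seen[]-array cycle-marking pass is replaced by constant-extra-space cycle-leader counting: for each index i, walk perm until an index <= i is met and count i as a cycle leader exactly when the walk returns to i (i is the minimum of its cycle); the mapping phase uses an occurrence-counter dict over a positions table instead of mutating deques.
import Mathlib
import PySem

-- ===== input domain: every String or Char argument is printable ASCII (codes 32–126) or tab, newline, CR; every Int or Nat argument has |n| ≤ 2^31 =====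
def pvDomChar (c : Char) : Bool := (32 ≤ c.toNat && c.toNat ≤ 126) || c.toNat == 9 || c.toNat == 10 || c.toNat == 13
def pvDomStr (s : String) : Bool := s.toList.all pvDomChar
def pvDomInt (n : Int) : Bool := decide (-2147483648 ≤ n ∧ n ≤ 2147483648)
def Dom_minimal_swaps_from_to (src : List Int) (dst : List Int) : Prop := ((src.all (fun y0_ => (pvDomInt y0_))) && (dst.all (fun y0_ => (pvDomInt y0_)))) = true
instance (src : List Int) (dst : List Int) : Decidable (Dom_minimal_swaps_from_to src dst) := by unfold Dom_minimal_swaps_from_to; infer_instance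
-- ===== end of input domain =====

-- B replaces A's seen[]-array cycle marking by cycle-leader counting (walk each cycle,
-- count indices that are minimal on their cycle); objective: alternative (not faster).

-- ===== PORT A =====
-- pos = defaultdict(deque); for i, v in enumerate(dst): pos[v].append(i)
-- (B's 'pos.setdefault(v, []).append(i)' builds the identical table, so both ports share pvPosTable)
def pvPosTable (dst : List Int) : PySem.Dict Int (List Int) :=
  (PySem.List.enumerate dst).foldl (fun d p => d.insert p.2 ((d.getD p.2 []) ++ [p.1])) PySem.Dict.empty

-- perm = [None]*len(src); for i, v in enumerate(src): perm[i] = pos[v].popleft()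
-- (perm[i] is assigned exactly once, at index i, in increasing order of i: ported as append;
--  popleft() on an empty deque raises IndexError in Python: ported as headD 0, excluded by Pre_)
def pvPermA (src : List Int) (dst : List Int) : List Int :=
  ((PySem.List.enumerate src).foldl
    (fun (st : PySem.Dict Int (List Int) × List Int) p =>
      let q := st.1.getD p.2 []
      (st.1.insert p.2 q.tail, st.2 ++ [q.headD 0]))
    (pvPosTable dst, [])).2

-- termination measure for the inner while loop: each pass flips one False in seen to True
theorem pvCountFalse_set_lt (l : List Bool) (i : Nat) (h : l[i]? = some false) :
    (l.set i true).count false < l.count false := by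
  have hlt : i < l.length := by
    by_contra hge
    simp [List.getElem?_eq_none (by omega : l.length ≤ i)] at h
  have hv : l[i] = false := by
    rw [List.getElem?_eq_getElem hlt] at h
    exact Option.some.inj h
  have key := List.count_set (a := true) (b := false) (l := l) (i := i) hlt
  simp [hv] at key
  have hp : 0 < List.count false l := by
    have := List.count_pos_iff.mpr (by
      have : l[i] ∈ l := List.getElem_mem hlt
      simpa [hv] using this)
    simpa using this
  omega

-- j = i; while not seen[j]: seen[j] = True; j = perm[j]
-- (the '0 ≤ j' conjunct only totalises the recursion; under Pre_ every visited j is ≥ 0)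
def pvAWalk (perm : List Int) (seen : List Bool) (j : Int) : List Bool :=
  if h : 0 ≤ j ∧ PySem.List.pyGet? seen j = some false then
    pvAWalk perm (PySem.List.pySetD seen j true) (PySem.List.pyGetD perm j 0)
  else seen
termination_by seen.count false
decreasing_by
  obtain ⟨hj, hget⟩ := h
  rw [PySem.List.pySetD_of_nonneg _ _ hj]
  exact pvCountFalse_set_lt seen j.toNat (by rw [← PySem.List.pyGet?_of_nonneg _ hj]; exact hget)

-- n = len(src); seen = [False]*n; cycles = 0; for i in range(n): if not seen[i]: cycles += 1; <walk>
def pvCyclesA (perm : List Int) (n : Nat) : Int :=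
  ((PySem.List.pyRange 0 (n : Int) 1).foldl
    (fun (st : List Bool × Int) i =>
      if PySem.List.pyGet? st.1 i = some false then (pvAWalk perm st.1 i, st.2 + 1) else st)
    (List.replicate n false, 0)).2

def minimal_swaps_from_to (src : List Int) (dst : List Int) : Int :=
  (src.length : Int) - pvCyclesA (pvPermA src dst) src.length

-- ===== PORT B =====
-- pos = {}; for i, v in enumerate(dst): pos.setdefault(v, []).append(i)
-- nxt = {}; perm = []; for v in src: k = nxt.get(v, 0); nxt[v] = k + 1; perm.append(pos[v][k])
-- (pos[v] / pos[v][k] raise KeyError/IndexError in Python when missing: ported via getD, excluded by Pre_)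
def pvPermB (src : List Int) (dst : List Int) : List Int :=
  ((src.foldl
    (fun (st : PySem.Dict Int Int × List Int) v =>
      let k := st.1.getD v 0
      (st.1.insert v (k + 1), st.2 ++ [PySem.List.pyGetD (PySem.Dict.getD (pvPosTable dst) v []) k 0]))
    (PySem.Dict.empty, []))).2

-- j = perm[i]; while j > i: j = perm[j]   (fuel n+1 is enough: under Pre_ the walk stays on
-- the cycle of i, which has length ≤ n and contains i itself, so it stops within n steps)
def pvBWalk (perm : List Int) (i : Int) (j : Int) : Nat → Int
  | 0 => j
  | fuel + 1 => if i < j then pvBWalk perm i (PySem.List.pyGetD perm j 0) fuel else j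

-- swaps = n; for i in range(n): <walk>; if j == i: swaps -= 1
def pvSwapsB (perm : List Int) (n : Nat) : Int :=
  (PySem.List.pyRange 0 (n : Int) 1).foldl
    (fun (swaps : Int) i =>
      if pvBWalk perm i (PySem.List.pyGetD perm i 0) (n + 1) = i then swaps - 1 else swaps)
    (n : Int)

def minimal_swaps_from_to_alt (src : List Int) (dst : List Int) : Int :=
  pvSwapsB (pvPermB src dst) src.length

-- ===== PRECONDITION & SPEC =====
-- Exactly the inputs on which the Python A returns: every value of src must occur often enough
-- among the first len(src) positions of dst (otherwise A raises IndexError, popping an exhausted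
-- deque in the mapping phase or indexing seen[] out of range in the cycle phase).
def Pre_minimal_swaps_from_to (src : List Int) (dst : List Int) : Prop :=
  ∀ v ∈ src, src.count v ≤ (dst.take src.length).count v
instance (src : List Int) (dst : List Int) : Decidable (Pre_minimal_swaps_from_to src dst) := by
  unfold Pre_minimal_swaps_from_to; infer_instance

def pvWitness_minimal_swaps_from_to : List Int × List Int := ([2, 1, 1], [1, 1, 2])

def Spec_minimal_swaps_from_to (src : List Int) (dst : List Int) (out : Int) : Prop := out = minimal_swaps_from_to_alt src dst
instance (src : List Int) (dst : List Int) (out : Int) : Decidable (Spec_minimal_swaps_from_to src dst out) := by unfold Spec_minimal_swaps_from_to; infer_instance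

-- ===== CLAIM (what is proved, stated in full; the proofs are below) =====
def Claim_equal_minimal_swaps_from_to : Prop := ∀ (src : List Int) (dst : List Int), Dom_minimal_swaps_from_to src dst → Pre_minimal_swaps_from_to src dst → Spec_minimal_swaps_from_to src dst (minimal_swaps_from_to src dst)

-- ===== LEMMAS AND PROOFS =====

def pvOcc (dst : List Int) (v : Int) : List Int :=
  ((PySem.List.enumerate dst).filter (fun p => p.2 == v)).map (·.1)

theorem pvEnum_append_singleton (xs : List Int) (x : Int) :
    PySem.List.enumerate (xs ++ [x]) = PySem.List.enumerate xs ++ [((xs.length : Int), x)] := by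
  rw [PySem.List.enumerate_append]
  simp [PySem.List.enumerate]

theorem pvOcc_append (xs : List Int) (x v : Int) :
    pvOcc (xs ++ [x]) v = pvOcc xs v ++ (if x == v then [(xs.length : Int)] else []) := by
  unfold pvOcc
  rw [pvEnum_append_singleton, List.filter_append, List.map_append]
  by_cases h : x == v <;> simp [h]

theorem pvPosTable_getD (dst : List Int) (v : Int) : (pvPosTable dst).getD v [] = pvOcc dst v := by
  induction dst using List.reverseRecOn with
  | nil => simp [pvPosTable, pvOcc, PySem.List.enumerate_nil, PySem.Dict.getD_empty]
  | append_singleton xs x ih =>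
    unfold pvPosTable at *
    rw [pvEnum_append_singleton, List.foldl_append, pvOcc_append]
    simp only [List.foldl_cons, List.foldl_nil]
    rw [PySem.Dict.getD_insert]
    by_cases h : v = x
    · subst h; simp [ih]
    · simp [h, ih, Ne.symm h]

def pvCanon (src : List Int) (dst : List Int) : List Int :=
  (List.range src.length).map (fun i =>
    PySem.List.pyGetD (pvOcc dst (src.getD i 0)) (((src.take i).count (src.getD i 0) : Nat) : Int) 0)

theorem pvHeadD_drop (l : List Int) (k : Nat) : (l.drop k).headD 0 = l.getD k 0 := by
  induction l generalizing k with
  | nil => simp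
  | cons a t ih =>
    cases k with
    | zero => simp [List.getD]
    | succ k => simpa using ih k

theorem pvCanon_append (src : List Int) (dst : List Int) (x : Int) :
    pvCanon (src ++ [x]) dst =
      pvCanon src dst ++ [PySem.List.pyGetD (pvOcc dst x) ((src.count x : Nat) : Int) 0] := by
  unfold pvCanon
  rw [List.length_append, List.length_singleton, List.range_succ, List.map_append]
  congr 1
  · apply List.map_congr_left
    intro i hi
    have hi' : i < src.length := List.mem_range.mp hi
    have h1 : (src ++ [x]).getD i 0 = src.getD i 0 := by
      simp [List.getD, List.getElem?_append_left hi']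
    have h2 : (src ++ [x]).take i = src.take i := by
      exact List.take_append_of_le_length (by omega)
    rw [h1, h2]
  · simp [List.getD, List.take_append_of_le_length (le_refl src.length)]

theorem pvAFold_spec (src dst : List Int) :
    (∀ v, (((PySem.List.enumerate src).foldl
        (fun (st : PySem.Dict Int (List Int) × List Int) p =>
          let q := st.1.getD p.2 []
          (st.1.insert p.2 q.tail, st.2 ++ [q.headD 0]))
        (pvPosTable dst, [])).1.getD v []) = (pvOcc dst v).drop (src.count v)) ∧
    ((PySem.List.enumerate src).foldl
        (fun (st : PySem.Dict Int (List Int) × List Int) p =>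
          let q := st.1.getD p.2 []
          (st.1.insert p.2 q.tail, st.2 ++ [q.headD 0]))
        (pvPosTable dst, [])).2 = pvCanon src dst := by
  induction src using List.reverseRecOn with
  | nil => simp [PySem.List.enumerate_nil, pvPosTable_getD, pvCanon]
  | append_singleton xs x ih =>
    obtain ⟨ih1, ih2⟩ := ih
    rw [pvEnum_append_singleton]
    constructor
    · intro v
      rw [List.foldl_append]
      simp only [List.foldl_cons, List.foldl_nil]
      rw [PySem.Dict.getD_insert]
      by_cases h : v = x
      · subst h
        rw [if_pos rfl, ih1, List.tail_drop]
        simp [List.count_append]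
      · rw [if_neg h, ih1]
        simp [List.count_append, List.count_singleton, h, Ne.symm h]
    · rw [List.foldl_append]
      simp only [List.foldl_cons, List.foldl_nil]
      rw [ih2, ih1, pvCanon_append, pvHeadD_drop]
      simp

theorem pvBFold_spec (src dst : List Int) :
    (∀ v, ((src.foldl
        (fun (st : PySem.Dict Int Int × List Int) v =>
          let k := st.1.getD v 0
          (st.1.insert v (k + 1), st.2 ++ [PySem.List.pyGetD (PySem.Dict.getD (pvPosTable dst) v []) k 0]))
        (PySem.Dict.empty, [])).1.getD v 0) = (src.count v : Int)) ∧
    (src.foldl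
        (fun (st : PySem.Dict Int Int × List Int) v =>
          let k := st.1.getD v 0
          (st.1.insert v (k + 1), st.2 ++ [PySem.List.pyGetD (PySem.Dict.getD (pvPosTable dst) v []) k 0]))
        (PySem.Dict.empty, [])).2 = pvCanon src dst := by
  induction src using List.reverseRecOn with
  | nil => simp [pvCanon, PySem.Dict.getD_empty]
  | append_singleton xs x ih =>
    obtain ⟨ih1, ih2⟩ := ih
    rw [List.foldl_append]
    constructor
    · intro v
      simp only [List.foldl_cons, List.foldl_nil]
      rw [PySem.Dict.getD_insert]
      by_cases h : v = x
      · subst h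
        rw [if_pos rfl, ih1]
        simp [List.count_append]
      · rw [if_neg h, ih1]
        simp [List.count_append, Ne.symm h]
    · simp only [List.foldl_cons, List.foldl_nil]
      rw [ih2, ih1, pvPosTable_getD, pvCanon_append]

theorem pvOcc_length (dst : List Int) (v : Int) : (pvOcc dst v).length = dst.count v := by
  induction dst using List.reverseRecOn with
  | nil => simp [pvOcc, PySem.List.enumerate_nil]
  | append_singleton xs x ih =>
    rw [pvOcc_append]
    by_cases h : x == v
    · simp [h, ih, List.count_append, eq_of_beq h]
    · simp only [h, if_false, List.append_nil, ih]
      simp only [List.count_append, List.count_singleton]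
      have hne : ¬ (x = v) := by simpa using h
      simp only [List.count_singleton, beq_iff_eq]
      simp [hne]
      exact ih

theorem pvOcc_mem (dst : List Int) (v x : Int) (hx : x ∈ pvOcc dst v) :
    ∃ k, k < dst.length ∧ x = (k : Int) ∧ dst.getD k 0 = v := by
  unfold pvOcc at hx
  obtain ⟨p, hp, rfl⟩ := List.mem_map.mp hx
  have hp' := List.mem_filter.mp hp
  obtain ⟨k, hk, hpe⟩ := (PySem.List.mem_enumerate_iff _ _ _).mp hp'.1
  refine ⟨k, hk, ?_, ?_⟩
  · rw [hpe]; simp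
  · have := hp'.2
    rw [hpe] at this
    simp only [beq_iff_eq] at this
    simp [List.getD, List.getElem?_eq_getElem hk, this]

theorem pvOcc_pairwise_lt (dst : List Int) (v : Int) : (pvOcc dst v).Pairwise (· < ·) := by
  unfold pvOcc
  refine List.Pairwise.map _ ?_ (List.Pairwise.filter _ (PySem.List.pairwise_lt_enumerate dst 0))
  exact fun a b h => h

structure PvPermOK (P : List Int) (n : Nat) : Prop where
  len : P.length = n
  lo : ∀ j, j < n → 0 ≤ P.getD j 0
  hi : ∀ j, j < n → P.getD j 0 < (n : Int)
  nd : P.Nodup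

theorem pvCount_take_lt (src : List Int) (i : Nat) (hi : i < src.length) :
    (src.take i).count (src.getD i 0) < src.count (src.getD i 0) := by
  set v := src.getD i 0 with hv
  have hsplit : src = src.take i ++ src.drop i := (List.take_append_drop i src).symm
  have hdrop : src.drop i = src[i] :: src.drop (i + 1) := List.drop_eq_getElem_cons hi
  have hvi : src[i] = v := by simp [hv, List.getD, List.getElem?_eq_getElem hi]
  calc (src.take i).count v < (src.take i).count v + (src.drop i).count v := by
        rw [hdrop, hvi]; simp
    _ = src.count v := by rw [← List.count_append, ← hsplit]

theorem pvCanon_getElem (src dst : List Int) (i : Nat) (hi : i < src.length)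
    (hc : (src.take i).count (src.getD i 0) < (pvOcc dst (src.getD i 0)).length) :
    (pvCanon src dst)[i]'(by simp [pvCanon]; omega) =
      (pvOcc dst (src.getD i 0))[(src.take i).count (src.getD i 0)]'hc := by
  unfold pvCanon
  simp only [List.getElem_map, List.getElem_range]
  rw [PySem.List.pyGetD_natCast]
  exact List.getD_eq_getElem _ _ hc

theorem pvOcc_getElem_lt (dst : List Int) (v : Int) (a b : Nat) (hab : a < b)
    (hb : b < (pvOcc dst v).length) :
    (pvOcc dst v)[a]'(by omega) < (pvOcc dst v)[b]'hb :=
  (List.pairwise_iff_getElem.mp (pvOcc_pairwise_lt dst v)) a b (by omega) hb hab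

theorem pvOcc_append_general (xs ys : List Int) (v : Int) :
    pvOcc (xs ++ ys) v = pvOcc xs v ++ (pvOcc ys v).map (· + (xs.length : Int)) := by
  induction ys using List.reverseRecOn with
  | nil => simp [pvOcc, PySem.List.enumerate_nil]
  | append_singleton ys y ih =>
    rw [← List.append_assoc, pvOcc_append, ih, pvOcc_append, List.map_append]
    by_cases h : y == v
    · simp only [h, if_true, List.map_cons, List.map_nil, List.append_assoc]
      congr 2
      simp only [List.length_append]
      push_cast
      ring_nf
    · simp [h]

theorem pvCanon_OK (src dst : List Int)
    (hP : ∀ v ∈ src, src.count v ≤ (dst.take src.length).count v) :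
    PvPermOK (pvCanon src dst) src.length := by
  have hPall : ∀ v, src.count v ≤ (dst.take src.length).count v := by
    intro v
    by_cases hv : v ∈ src
    · exact hP v hv
    · rw [List.count_eq_zero_of_not_mem hv]
      omega
  have hctake : ∀ v, (dst.take src.length).count v ≤ dst.count v :=
    fun v => (List.take_prefix src.length dst).count_le v
  have hccc : ∀ i, i < src.length →
      (src.take i).count (src.getD i 0) < (pvOcc dst (src.getD i 0)).length := by
    intro i hi
    rw [pvOcc_length]
    have h1 := pvCount_take_lt src i hi
    have h2 := hPall (src.getD i 0)
    have h3 := hctake (src.getD i 0)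
    omega
  have hcct : ∀ i, i < src.length →
      (src.take i).count (src.getD i 0) < (pvOcc (dst.take src.length) (src.getD i 0)).length := by
    intro i hi
    rw [pvOcc_length]
    have h1 := pvCount_take_lt src i hi
    have h2 := hPall (src.getD i 0)
    omega
  have happ : ∀ v, pvOcc dst v = pvOcc (dst.take src.length) v ++
      (pvOcc (dst.drop src.length) v).map (· + ((dst.take src.length).length : Int)) := by
    intro v
    conv_lhs => rw [← List.take_append_drop src.length dst]
    exact pvOcc_append_general _ _ v
  have hpref : ∀ i (hi : i < src.length),
      (pvOcc dst (src.getD i 0))[(src.take i).count (src.getD i 0)]'(hccc i hi)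
        = (pvOcc (dst.take src.length) (src.getD i 0))[(src.take i).count (src.getD i 0)]'(hcct i hi) := by
    intro i hi
    have := happ (src.getD i 0)
    rw [List.getElem_of_eq this _]
    exact List.getElem_append_left (hcct i hi)
  have hmem : ∀ i (hi : i < src.length), ∃ k, k < src.length ∧
      (pvCanon src dst)[i]'(by simp [pvCanon]; omega) = (k : Int) ∧
      (dst.take src.length).getD k 0 = src.getD i 0 := by
    intro i hi
    rw [pvCanon_getElem src dst i hi (hccc i hi), hpref i hi]
    have hm : (pvOcc (dst.take src.length) (src.getD i 0))[(src.take i).count (src.getD i 0)]'(hcct i hi)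
        ∈ pvOcc (dst.take src.length) (src.getD i 0) := List.getElem_mem _
    obtain ⟨k, hk, he, hd⟩ := pvOcc_mem (dst.take src.length) _ _ hm
    refine ⟨k, ?_, he, hd⟩
    rw [List.length_take] at hk
    omega
  have hlenc : (pvCanon src dst).length = src.length := by simp [pvCanon]
  refine ⟨hlenc, ?_, ?_, ?_⟩
  · intro j hj
    obtain ⟨k, hk, he, _⟩ := hmem j hj
    rw [List.getD, List.getElem?_eq_getElem (by omega : j < (pvCanon src dst).length)]
    simp only [Option.getD_some]
    rw [he]; positivity
  · intro j hj
    obtain ⟨k, hk, he, _⟩ := hmem j hj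
    rw [List.getD, List.getElem?_eq_getElem (by omega : j < (pvCanon src dst).length)]
    simp only [Option.getD_some]
    rw [he]; exact_mod_cast hk
  · rw [List.nodup_iff_getElem?_ne_getElem?]
    intro i j hij hj
    have hj' : j < src.length := by omega
    have hi' : i < src.length := by omega
    rw [List.getElem?_eq_getElem (by omega : i < (pvCanon src dst).length),
        List.getElem?_eq_getElem (by omega : j < (pvCanon src dst).length)]
    intro hEq
    have hEq : (pvCanon src dst)[i]'(by omega) = (pvCanon src dst)[j]'(by omega) :=
      Option.some.inj hEq
    rw [pvCanon_getElem src dst i hi' (hccc i hi'),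
        pvCanon_getElem src dst j hj' (hccc j hj')] at hEq
    by_cases hv : src.getD i 0 = src.getD j 0
    · -- same value: occurrence counters differ, occ is strictly increasing
      have hEq' : (pvOcc dst (src.getD i 0)).getD ((src.take i).count (src.getD i 0)) 0
          = (pvOcc dst (src.getD j 0)).getD ((src.take j).count (src.getD j 0)) 0 := by
        rw [List.getD_eq_getElem _ _ (hccc i hi'), List.getD_eq_getElem _ _ (hccc j hj'), hEq]
      rw [hv] at hEq'
      set v := src.getD j 0 with hvdef
      have hstep : (src.take (i+1)).count v = (src.take i).count v + 1 := by
        rw [List.take_add_one, List.count_append]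
        have hgi : src[i]? = some v := by
          rw [List.getElem?_eq_getElem hi']
          have : src[i] = v := by
            have h2 := hv
            simp [hvdef, List.getD, List.getElem?_eq_getElem hi'] at h2
            exact h2
          rw [this]
        simp [hgi]
      have hle : (src.take (i+1)).count v ≤ (src.take j).count v := by
        have hpref2 : (src.take (i+1)).IsPrefix (src.take j) :=
          List.prefix_take_iff.mpr ⟨List.take_prefix _ _, by rw [List.length_take]; omega⟩
        exact hpref2.count_le v
      have hlt : (src.take i).count v < (src.take j).count v := by omega
      have hccj : (src.take j).count v < (pvOcc dst v).length := by
        have h3 := hccc j hj'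
        rw [← hvdef] at h3
        exact h3
      have hcl : (src.take i).count v < (pvOcc dst v).length := by omega
      have hgl := pvOcc_getElem_lt dst v _ _ hlt hccj
      rw [List.getD_eq_getElem _ _ hcl, List.getD_eq_getElem _ _ hccj] at hEq'
      omega
    · -- different values: the shared dst position would carry both values
      rw [hpref i hi', hpref j hj'] at hEq
      have hmi : (pvOcc (dst.take src.length) (src.getD i 0))[(src.take i).count (src.getD i 0)]'(hcct i hi')
          ∈ pvOcc (dst.take src.length) (src.getD i 0) := List.getElem_mem _
      have hmj : (pvOcc (dst.take src.length) (src.getD j 0))[(src.take j).count (src.getD j 0)]'(hcct j hj')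
          ∈ pvOcc (dst.take src.length) (src.getD j 0) := List.getElem_mem _
      obtain ⟨k1, hk1, he1, hd1⟩ := pvOcc_mem (dst.take src.length) _ _ hmi
      obtain ⟨k2, hk2, he2, hd2⟩ := pvOcc_mem (dst.take src.length) _ _ hmj
      rw [he1, he2] at hEq
      have : k1 = k2 := by exact_mod_cast hEq
      subst this
      rw [hd1] at hd2
      exact hv hd2

def pvF (P : List Int) : Nat → Nat := fun j => (P.getD j 0).toNat

theorem pvF_lt {P : List Int} {n : Nat} (h : PvPermOK P n) {j : Nat} (hj : j < n) :
    pvF P j < n := by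
  have := h.hi j hj
  have := h.lo j hj
  unfold pvF
  omega

theorem pvF_cast {P : List Int} {n : Nat} (h : PvPermOK P n) {j : Nat} (hj : j < n) :
    P.getD j 0 = ((pvF P j : Nat) : Int) := by
  have := h.lo j hj
  unfold pvF
  omega

theorem pvF_inj {P : List Int} {n : Nat} (h : PvPermOK P n) {j k : Nat}
    (hj : j < n) (hk : k < n) (he : pvF P j = pvF P k) : j = k := by
  have hj' : j < P.length := by rw [h.len]; exact hj
  have hk' : k < P.length := by rw [h.len]; exact hk
  have hPe : P[j]'hj' = P[k]'hk' := by
    have e1 : P.getD j 0 = P[j]'hj' := List.getD_eq_getElem _ _ hj'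
    have e2 : P.getD k 0 = P[k]'hk' := List.getD_eq_getElem _ _ hk'
    have := pvF_cast h hj
    have := pvF_cast h hk
    omega
  have hinj := List.nodup_iff_injective_get.mp h.nd
  have : (⟨j, hj'⟩ : Fin P.length) = ⟨k, hk'⟩ := by
    apply hinj
    simpa [List.get_eq_getElem] using hPe
  simpa using congrArg Fin.val this

theorem pvIter_lt {P : List Int} {n : Nat} (h : PvPermOK P n) (t : Nat) {j : Nat}
    (hj : j < n) : (pvF P)^[t] j < n := by
  induction t generalizing j with
  | zero => simpa
  | succ t ih =>
    rw [Function.iterate_succ_apply]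
    exact ih (pvF_lt h hj)

theorem pvCancel {P : List Int} {n : Nat} (h : PvPermOK P n) (t : Nat) {j k : Nat}
    (hj : j < n) (hk : k < n) (he : (pvF P)^[t] j = (pvF P)^[t] k) : j = k := by
  induction t generalizing j k with
  | zero => simpa using he
  | succ t ih =>
    rw [Function.iterate_succ_apply, Function.iterate_succ_apply] at he
    exact pvF_inj h hj hk (ih (pvF_lt h hj) (pvF_lt h hk) he)

theorem pvPeriod {P : List Int} {n : Nat} (h : PvPermOK P n) {i : Nat} (hi : i < n) :
    ∃ L, 0 < L ∧ L ≤ n ∧ (pvF P)^[L] i = i := by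
  have hmaps : ∀ k ∈ Finset.range (n + 1), (pvF P)^[k] i ∈ Finset.range n := by
    intro k _
    exact Finset.mem_range.mpr (pvIter_lt h k hi)
  obtain ⟨a, ha, b, hb, hab, he⟩ :=
    Finset.exists_ne_map_eq_of_card_lt_of_maps_to
      (by simp : (Finset.range n).card < (Finset.range (n + 1)).card)
      (fun k hk => hmaps k hk)
  rw [Finset.mem_range] at ha hb
  rcases Nat.lt_or_ge a b with hlt | hge
  · refine ⟨b - a, by omega, by omega, ?_⟩
    have : (pvF P)^[a + (b - a)] i = (pvF P)^[a] ((pvF P)^[b - a] i) :=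
      Function.iterate_add_apply _ _ _ _
    rw [(by omega : a + (b - a) = b)] at this
    exact pvCancel h a (pvIter_lt h _ hi) hi (by rw [← this]; exact he.symm)
  · have hlt : b < a := by omega
    refine ⟨a - b, by omega, by omega, ?_⟩
    have : (pvF P)^[b + (a - b)] i = (pvF P)^[b] ((pvF P)^[a - b] i) :=
      Function.iterate_add_apply _ _ _ _
    rw [(by omega : b + (a - b) = a)] at this
    exact pvCancel h b (pvIter_lt h _ hi) hi (by rw [← this]; exact he)

theorem pvIter_mult (f : Nat → Nat) {i L : Nat} (hL : f^[L] i = i) :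
    ∀ q, f^[q * L] i = i := by
  intro q
  induction q with
  | zero => simp
  | succ q ih =>
    have : (q + 1) * L = L + q * L := by ring
    rw [this, Function.iterate_add_apply, ih, hL]

theorem pvIter_mod (f : Nat → Nat) {i L : Nat} (hL0 : 0 < L) (hL : f^[L] i = i) (t : Nat) :
    f^[t] i = f^[t % L] i := by
  conv_lhs => rw [(Nat.div_add_mod t L).symm]
  rw [Nat.add_comm, Function.iterate_add_apply, Nat.mul_comm L (t / L), pvIter_mult f hL (t / L)]

def pvReach (P : List Int) (i j : Nat) : Prop := ∃ t, (pvF P)^[t] i = j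

theorem pvReach_trans {P : List Int} {i j k : Nat} (h1 : pvReach P i j)
    (h2 : pvReach P j k) : pvReach P i k := by
  obtain ⟨t1, ht1⟩ := h1
  obtain ⟨t2, ht2⟩ := h2
  exact ⟨t2 + t1, by rw [Function.iterate_add_apply, ht1, ht2]⟩

theorem pvReach_symm {P : List Int} {n : Nat} (h : PvPermOK P n) {i j : Nat} (hi : i < n)
    (hr : pvReach P i j) : pvReach P j i := by
  obtain ⟨t, ht⟩ := hr
  obtain ⟨L, hL0, hLn, hLi⟩ := pvPeriod h hi
  refine ⟨L - t % L, ?_⟩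
  rw [← ht, ← Function.iterate_add_apply]
  have h2 : t % L < L := Nat.mod_lt _ hL0
  have h1 := Nat.mod_add_div' t L
  have hid : L - t % L + t = (t / L + 1) * L := by
    rw [Nat.add_mul, Nat.one_mul]
    omega
  rw [hid]
  exact pvIter_mult _ hLi _

theorem pvReach_bounded {P : List Int} {n : Nat} (h : PvPermOK P n) {i j : Nat} (hi : i < n)
    (hr : pvReach P i j) : ∃ t, t ≤ n ∧ (pvF P)^[t] i = j := by
  obtain ⟨t, ht⟩ := hr
  obtain ⟨L, hL0, hLn, hLi⟩ := pvPeriod h hi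
  refine ⟨t % L, by have := Nat.mod_lt t hL0; omega, ?_⟩
  rw [← pvIter_mod _ hL0 hLi, ht]

def pvReachb (P : List Int) (n i j : Nat) : Bool := decide (∃ t ≤ n, (pvF P)^[t] i = j)

theorem pvReachb_iff {P : List Int} {n : Nat} (h : PvPermOK P n) {i : Nat} (hi : i < n)
    (j : Nat) : pvReachb P n i j = true ↔ pvReach P i j := by
  unfold pvReachb
  rw [decide_eq_true_iff]
  constructor
  · rintro ⟨t, _, ht⟩; exact ⟨t, ht⟩
  · intro hr
    obtain ⟨t, htn, ht⟩ := pvReach_bounded h hi hr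
    exact ⟨t, htn, ht⟩

def pvLead (P : List Int) (i : Nat) : Prop := ∀ t, i ≤ (pvF P)^[t] i

def pvLeadb (P : List Int) (n i : Nat) : Bool := decide (∀ t ≤ n, i ≤ (pvF P)^[t] i)

theorem pvLeadb_iff {P : List Int} {n : Nat} (h : PvPermOK P n) {i : Nat} (hi : i < n) :
    pvLeadb P n i = true ↔ pvLead P i := by
  unfold pvLeadb pvLead
  rw [decide_eq_true_iff]
  constructor
  · intro hb t
    obtain ⟨L, hL0, hLn, hLi⟩ := pvPeriod h hi
    rw [pvIter_mod _ hL0 hLi t]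
    exact hb _ (by have := Nat.mod_lt t hL0; omega)
  · intro hl t _; exact hl t

theorem pvSeen_iff_not_lead {P : List Int} {n : Nat} (h : PvPermOK P n) {m : Nat}
    (hm : m < n) : (∃ s, s < m ∧ pvReach P s m) ↔ ¬ pvLead P m := by
  constructor
  · rintro ⟨s, hsm, hr⟩ hl
    obtain ⟨t, ht⟩ := pvReach_symm h (by omega) hr
    have := hl t
    omega
  · intro hl
    rw [pvLead] at hl
    push_neg at hl
    obtain ⟨t, ht⟩ := hl
    refine ⟨(pvF P)^[t] m, by omega, ?_⟩
    exact pvReach_symm h hm ⟨t, rfl⟩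

theorem pvMinT {P : List Int} {n : Nat} (h : PvPermOK P n) {i : Nat} (hi : i < n) :
    ∃ T, 0 < T ∧ T ≤ n ∧ (pvF P)^[T] i ≤ i ∧ ∀ t, 0 < t → t < T → i < (pvF P)^[t] i := by
  obtain ⟨L, hL0, hLn, hLi⟩ := pvPeriod h hi
  have hex : ∃ t, 0 < t ∧ t ≤ n ∧ (pvF P)^[t] i ≤ i := ⟨L, hL0, hLn, by omega⟩
  classical
  refine ⟨Nat.find hex, (Nat.find_spec hex).1, (Nat.find_spec hex).2.1,
    (Nat.find_spec hex).2.2, ?_⟩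
  intro t ht0 htT
  by_contra hc
  have hfn : Nat.find hex ≤ n := (Nat.find_spec hex).2.1
  exact Nat.find_min hex htT ⟨ht0, by omega, by omega⟩

theorem pvPyGetD_cast {P : List Int} {n : Nat} (h : PvPermOK P n) {j : Nat} (hj : j < n) :
    PySem.List.pyGetD P ((j : Nat) : Int) 0 = ((pvF P j : Nat) : Int) := by
  rw [PySem.List.pyGetD_natCast]
  exact pvF_cast h hj

theorem pvBWalk_run {P : List Int} {n : Nat} (h : PvPermOK P n) {i : Nat} (hi : i < n)
    {T : Nat} (hT1 : (pvF P)^[T] i ≤ i) (hT2 : ∀ t, 0 < t → t < T → i < (pvF P)^[t] i) :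
    ∀ fuel t, 0 < t → t ≤ T → T ≤ t + fuel →
      pvBWalk P ((i : Nat) : Int) (((pvF P)^[t] i : Nat) : Int) fuel
        = (((pvF P)^[T] i : Nat) : Int) := by
  intro fuel
  induction fuel with
  | zero =>
    intro t _ h2 h3
    have : t = T := by omega
    subst this
    rfl
  | succ fuel ih =>
    intro t ht0 htT hTf
    rcases Nat.lt_or_ge t T with hlt | hge
    · have hgt : i < (pvF P)^[t] i := hT2 t ht0 hlt
      show (if ((i : Nat) : Int) < (((pvF P)^[t] i : Nat) : Int) then _ else _) = _
      rw [if_pos (by exact_mod_cast hgt)]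
      rw [pvPyGetD_cast h (pvIter_lt h t hi), ← Function.iterate_succ_apply' (pvF P) t i]
      exact ih (t + 1) (by omega) (by omega) (by omega)
    · have : t = T := by omega
      subst this
      show (if ((i : Nat) : Int) < (((pvF P)^[t] i : Nat) : Int) then _ else _) = _
      rw [if_neg (by exact_mod_cast Nat.not_lt.mpr hT1)]

theorem pvB_entry {P : List Int} {n : Nat} (h : PvPermOK P n) {i : Nat} (hi : i < n) :
    (pvBWalk P ((i : Nat) : Int) (PySem.List.pyGetD P ((i : Nat) : Int) 0) (n + 1)
      = ((i : Nat) : Int)) ↔ pvLeadb P n i = true := by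
  obtain ⟨T, hT0, hTn, hTle, hTmin⟩ := pvMinT h hi
  rw [pvPyGetD_cast h hi]
  have h1 : pvF P i = (pvF P)^[1] i := by simp
  rw [h1, pvBWalk_run h hi hTle hTmin (n + 1) 1 (by omega) (by omega) (by omega)]
  rw [pvLeadb_iff h hi]
  constructor
  · intro he
    have heT : (pvF P)^[T] i = i := by exact_mod_cast he
    intro t
    rw [pvIter_mod _ hT0 heT t]
    rcases Nat.eq_zero_or_pos (t % T) with h0 | hpos
    · rw [h0]; simp
    · exact le_of_lt (hTmin _ hpos (Nat.mod_lt _ hT0))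
  · intro hl
    have := hl T
    have : (pvF P)^[T] i = i := by omega
    rw [this]

theorem pvSwapsB_eq {P : List Int} {n : Nat} (h : PvPermOK P n) :
    pvSwapsB P n = (n : Int) - ((List.range n).countP (fun i => pvLeadb P n i) : Int) := by
  unfold pvSwapsB
  have hr : PySem.List.pyRange 0 (n : Int) 1 = (List.range n).map (fun k => ((k : Nat) : Int)) := by
    rw [PySem.List.pyRange_one]
    simp
  rw [hr, List.foldl_map]
  have main : ∀ m, m ≤ n →
      (List.range m).foldl
        (fun (swaps : Int) (i : Nat) =>
          if pvBWalk P ((i : Nat) : Int) (PySem.List.pyGetD P ((i : Nat) : Int) 0) (n + 1)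
              = ((i : Nat) : Int) then swaps - 1 else swaps)
        (n : Int)
      = (n : Int) - ((List.range m).countP (fun i => pvLeadb P n i) : Int) := by
    intro m
    induction m with
    | zero => simp
    | succ m ih =>
      intro hm
      rw [List.range_succ, List.foldl_append, List.countP_append, ih (by omega)]
      simp only [List.foldl_cons, List.foldl_nil, List.countP_cons, List.countP_nil]
      by_cases hl : pvLeadb P n m = true
      · rw [if_pos ((pvB_entry h (by omega)).mpr hl)]
        simp [hl]
        omega
      · rw [if_neg (fun hcon => hl ((pvB_entry h (by omega)).mp hcon))]
        simp [hl]
  exact main n (le_refl n)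

def pvAnyb (P : List Int) (n m j : Nat) : Bool := (List.range m).any (fun s => pvReachb P n s j)

def pvSeenC (P : List Int) (n m : Nat) : List Bool := (List.range n).map (fun j => pvAnyb P n m j)

def pvMark (P : List Int) (n m s t : Nat) : List Bool :=
  (List.range n).map (fun j => pvAnyb P n m j || (List.range t).any (fun u => decide ((pvF P)^[u] s = j)))

theorem pvAnyb_iff {P : List Int} {n : Nat} (h : PvPermOK P n) {m : Nat} (hm : m ≤ n)
    (j : Nat) : pvAnyb P n m j = true ↔ ∃ s, s < m ∧ pvReach P s j := by
  unfold pvAnyb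
  rw [List.any_eq_true]
  constructor
  · rintro ⟨s, hs, hr⟩
    exact ⟨s, List.mem_range.mp hs, (pvReachb_iff h (by have := List.mem_range.mp hs; omega) j).mp hr⟩
  · rintro ⟨s, hs, hr⟩
    exact ⟨s, List.mem_range.mpr hs, (pvReachb_iff h (by omega) j).mpr hr⟩

theorem pvMinPeriod {P : List Int} {n : Nat} (h : PvPermOK P n) {i : Nat} (hi : i < n) :
    ∃ L, 0 < L ∧ L ≤ n ∧ (pvF P)^[L] i = i ∧ ∀ t, 0 < t → t < L → (pvF P)^[t] i ≠ i := by
  obtain ⟨L0, hL0, hLn, hLi⟩ := pvPeriod h hi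
  have hex : ∃ t, 0 < t ∧ t ≤ n ∧ (pvF P)^[t] i = i := ⟨L0, hL0, hLn, hLi⟩
  classical
  refine ⟨Nat.find hex, (Nat.find_spec hex).1, (Nat.find_spec hex).2.1,
    (Nat.find_spec hex).2.2, ?_⟩
  intro t ht0 htT hteq
  have hfn : Nat.find hex ≤ n := (Nat.find_spec hex).2.1
  exact Nat.find_min hex htT ⟨ht0, by omega, hteq⟩

theorem pvDistinct {P : List Int} {n : Nat} (h : PvPermOK P n) {s : Nat} (hs : s < n)
    {L : Nat} (hmin : ∀ t, 0 < t → t < L → (pvF P)^[t] s ≠ s) {a b : Nat}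
    (hab : a < b) (hbL : b < L) : (pvF P)^[a] s ≠ (pvF P)^[b] s := by
  intro he
  have : (pvF P)^[a] ((pvF P)^[b - a] s) = (pvF P)^[a] s := by
    rw [← Function.iterate_add_apply, (by omega : a + (b - a) = b)]
    exact he.symm
  have := pvCancel h a (pvIter_lt h _ hs) hs this
  exact hmin (b - a) (by omega) (by omega) this

theorem pvMark_getElem (P : List Int) (n m s t j : Nat) (hj : j < n) :
    (pvMark P n m s t)[j]'(by simp [pvMark]; omega)
      = (pvAnyb P n m j || (List.range t).any (fun u => decide ((pvF P)^[u] s = j))) := by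
  unfold pvMark
  simp

theorem pvAWalk_run {P : List Int} {n : Nat} (h : PvPermOK P n) {m s : Nat} (hm : m ≤ n)
    (hs : s < n) (hns : pvAnyb P n m s = false) {L : Nat} (hL0 : 0 < L)
    (hLs : (pvF P)^[L] s = s) (hmin : ∀ t, 0 < t → t < L → (pvF P)^[t] s ≠ s) :
    ∀ d t, t ≤ L → L - t ≤ d →
      pvAWalk P (pvMark P n m s t) (((pvF P)^[t] s : Nat) : Int) = pvMark P n m s L := by
  intro d
  induction d with
  | zero =>
    intro t htL hd
    have hteq : t = L := by omega
    rw [hteq]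
    rw [pvAWalk]
    rw [dif_neg]
    rintro ⟨_, hget⟩
    rw [hLs, PySem.List.pyGet?_natCast] at hget
    rw [List.getElem?_eq_getElem (by simp [pvMark]; omega : s < (pvMark P n m s L).length)] at hget
    have := Option.some.inj hget
    rw [pvMark_getElem P n m s L s hs] at this
    have hmem : (List.range L).any (fun u => decide ((pvF P)^[u] s = s)) = true := by
      rw [List.any_eq_true]
      exact ⟨0, List.mem_range.mpr hL0, by simp⟩
    rw [hmem] at this
    simp at this
  | succ d ih =>
    intro t htL hd
    rcases Nat.eq_or_lt_of_le htL with he | hlt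
    · rw [he]
      exact ih L (le_refl L) (by omega)
    · -- t < L : current position is unseen; mark it and step
      set jt := (pvF P)^[t] s with hjt
      have hjtn : jt < n := pvIter_lt h t hs
      have hentry : (pvMark P n m s t)[jt]'(by simp [pvMark]; omega) = false := by
        rw [pvMark_getElem P n m s t jt hjtn]
        have h1 : pvAnyb P n m jt = false := by
          by_contra hc
          have hc' : pvAnyb P n m jt = true := by
            cases hx : pvAnyb P n m jt
            · exact absurd hx hc
            · rfl
          obtain ⟨s', hs', hr⟩ := (pvAnyb_iff h hm jt).mp hc'
          have hrs : pvReach P s jt := ⟨t, rfl⟩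
          have : pvReach P s' s := pvReach_trans hr (pvReach_symm h hs hrs)
          have : pvAnyb P n m s = true := (pvAnyb_iff h hm s).mpr ⟨s', hs', this⟩
          rw [hns] at this
          exact absurd this (by simp)
        have h2 : (List.range t).any (fun u => decide ((pvF P)^[u] s = jt)) = false := by
          rw [List.any_eq_false]
          intro u hu
          simp only [decide_eq_true_eq]
          exact pvDistinct h hs hmin (List.mem_range.mp hu) hlt
        rw [h1, h2]
        rfl
      have hcond : 0 ≤ ((jt : Nat) : Int) ∧
          PySem.List.pyGet? (pvMark P n m s t) ((jt : Nat) : Int) = some false := by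
        refine ⟨by positivity, ?_⟩
        rw [PySem.List.pyGet?_natCast,
          List.getElem?_eq_getElem (by simp [pvMark]; omega : jt < (pvMark P n m s t).length), hentry]
      rw [pvAWalk, dif_pos hcond]
      -- after marking, the state is pvMark (t+1) and the cursor advances
      have hset : PySem.List.pySetD (pvMark P n m s t) ((jt : Nat) : Int) true
          = pvMark P n m s (t + 1) := by
        rw [PySem.List.pySetD_natCast]
        apply List.ext_getElem
        · simp [pvMark]
        · intro k hk1 hk2
          have hkn : k < n := by simpa [pvMark] using hk2
          rw [List.getElem_set]
          by_cases hkj : jt = k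
          · subst hkj
            rw [if_pos rfl, pvMark_getElem P n m s (t + 1) jt hkn]
            have : (List.range (t + 1)).any (fun u => decide ((pvF P)^[u] s = jt)) = true := by
              rw [List.any_eq_true]
              exact ⟨t, List.mem_range.mpr (by omega), by simp [hjt]⟩
            rw [this, Bool.or_true]
          · rw [if_neg hkj, pvMark_getElem P n m s t k hkn, pvMark_getElem P n m s (t + 1) k hkn]
            congr 1
            rw [List.range_succ, List.any_append]
            have : [t].any (fun u => decide ((pvF P)^[u] s = k)) = false := by
              simp [← hjt, hkj]
            rw [this, Bool.or_false]
      rw [hset, pvPyGetD_cast h hjtn, hjt, ← Function.iterate_succ_apply' (pvF P) t s]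
      exact ih (t + 1) (by omega) (by omega)

theorem pvSeenC_zero (P : List Int) (n : Nat) : pvSeenC P n 0 = List.replicate n false := by
  unfold pvSeenC pvAnyb
  apply List.ext_getElem
  · simp
  · intro k hk1 hk2
    simp

theorem pvMark_zero (P : List Int) (n m s : Nat) : pvMark P n m s 0 = pvSeenC P n m := by
  unfold pvMark pvSeenC
  apply List.map_congr_left
  intro j _
  simp

theorem pvMark_L_eq_seenC_succ {P : List Int} {n : Nat} (h : PvPermOK P n) {m : Nat}
    (hmn : m < n) {L : Nat} (hL0 : 0 < L) (hLn : L ≤ n) (hLs : (pvF P)^[L] m = m) :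
    pvMark P n m m L = pvSeenC P n (m + 1) := by
  unfold pvMark pvSeenC
  apply List.map_congr_left
  intro j hj
  have hjn : j < n := List.mem_range.mp hj
  have hiff : (List.range L).any (fun u => decide ((pvF P)^[u] m = j)) = pvReachb P n m j := by
    rcases hx : pvReachb P n m j with hfalse | htrue
    · rw [List.any_eq_false]
      intro u hu
      simp only [decide_eq_true_eq]
      intro he
      have : pvReach P m j := ⟨u, he⟩
      have := (pvReachb_iff h hmn j).mpr this
      rw [hx] at this
      exact absurd this (by simp)
    · rw [List.any_eq_true]
      obtain ⟨t, ht⟩ := (pvReachb_iff h hmn j).mp hx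
      refine ⟨t % L, List.mem_range.mpr (Nat.mod_lt _ hL0), ?_⟩
      simp only [decide_eq_true_eq]
      rw [← pvIter_mod _ hL0 hLs, ht]
  rw [hiff]
  unfold pvAnyb
  rw [List.range_succ, List.any_append]
  simp

theorem pvCyclesA_eq {P : List Int} {n : Nat} (h : PvPermOK P n) :
    pvCyclesA P n = ((List.range n).countP (fun i => pvLeadb P n i) : Int) := by
  unfold pvCyclesA
  have hr : PySem.List.pyRange 0 (n : Int) 1 = (List.range n).map (fun k => ((k : Nat) : Int)) := by
    rw [PySem.List.pyRange_one]
    simp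
  rw [hr, List.foldl_map]
  have main : ∀ m, m ≤ n →
      (List.range m).foldl
        (fun (st : List Bool × Int) (i : Nat) =>
          if PySem.List.pyGet? st.1 ((i : Nat) : Int) = some false
          then (pvAWalk P st.1 ((i : Nat) : Int), st.2 + 1) else st)
        (List.replicate n false, 0)
      = (pvSeenC P n m, ((List.range m).countP (fun i => pvLeadb P n i) : Int)) := by
    intro m
    induction m with
    | zero => simp [pvSeenC_zero]
    | succ m ih =>
      intro hm
      rw [List.range_succ, List.foldl_append, ih (by omega)]
      simp only [List.foldl_cons, List.foldl_nil]
      have hmn : m < n := by omega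
      have hget : PySem.List.pyGet? (pvSeenC P n m) ((m : Nat) : Int) = some (pvAnyb P n m m) := by
        rw [PySem.List.pyGet?_natCast,
          List.getElem?_eq_getElem (by simp [pvSeenC]; omega : m < (pvSeenC P n m).length)]
        unfold pvSeenC
        simp
      rw [List.countP_append]
      simp only [List.countP_cons, List.countP_nil]
      rcases hx : pvAnyb P n m m with hfalse | htrue
      · -- m unseen: new cycle, walk marks the whole orbit of m
        rw [if_pos (by rw [hget, hx])]
        have hlead : pvLead P m := by
          by_contra hcon
          obtain ⟨s', hs', hr'⟩ := (pvSeen_iff_not_lead h hmn).mpr hcon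
          have := (pvAnyb_iff h (by omega) m).mpr ⟨s', hs', hr'⟩
          rw [hx] at this
          exact absurd this (by simp)
        have hleadb : pvLeadb P n m = true := (pvLeadb_iff h hmn).mpr hlead
        obtain ⟨L, hL0, hLn, hLs, hLmin⟩ := pvMinPeriod h hmn
        have hwalk := pvAWalk_run h (by omega : m ≤ n) hmn hx hL0 hLs hLmin L 0 (by omega) (by omega)
        rw [pvMark_zero] at hwalk
        simp only [Function.iterate_zero, id] at hwalk
        rw [hwalk, pvMark_L_eq_seenC_succ h hmn hL0 hLn hLs]
        simp only [hleadb, if_true]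
        refine Prod.ext rfl ?_
        push_cast
        ring
      · -- m already seen: no new cycle, seen set unchanged
        rw [if_neg (by rw [hget, hx]; simp)]
        have hnl : ¬ pvLead P m := by
          rw [← pvSeen_iff_not_lead h hmn]
          exact (pvAnyb_iff h (by omega) m).mp hx
        have hleadb : pvLeadb P n m = false := by
          rcases hy : pvLeadb P n m with hf | ht
          · rfl
          · exact absurd ((pvLeadb_iff h hmn).mp hy) hnl
        have hseen : pvSeenC P n (m + 1) = pvSeenC P n m := by
          unfold pvSeenC
          apply List.map_congr_left
          intro j hj
          have hjn : j < n := List.mem_range.mp hj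
          unfold pvAnyb
          rw [List.range_succ, List.any_append]
          rcases hz : pvReachb P n m j with hf | ht
          · simp [hz]
          · have hrj := (pvReachb_iff h hmn j).mp hz
            obtain ⟨s', hs', hrs⟩ := (pvAnyb_iff h (by omega) m).mp hx
            have : pvReach P s' j := pvReach_trans hrs hrj
            have : pvAnyb P n m j = true := (pvAnyb_iff h (by omega) j).mpr ⟨s', hs', this⟩
            unfold pvAnyb at this
            rw [this]
            simp
        rw [hseen]
        simp [hleadb]
  have := main n (le_refl n)
  rw [this]

theorem pvPhase2 {P : List Int} {n : Nat} (h : PvPermOK P n) :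
    (n : Int) - pvCyclesA P n = pvSwapsB P n := by
  rw [pvCyclesA_eq h, pvSwapsB_eq h]

theorem pvPermA_eq_canon (src dst : List Int) : pvPermA src dst = pvCanon src dst :=
  (pvAFold_spec src dst).2

theorem pvPermB_eq_canon (src dst : List Int) : pvPermB src dst = pvCanon src dst :=
  (pvBFold_spec src dst).2

theorem pv_main : ∀ (src dst : List Int),
    (∀ v ∈ src, src.count v ≤ (dst.take src.length).count v) →
    minimal_swaps_from_to src dst = minimal_swaps_from_to_alt src dst := by
  intro src dst hP
  unfold minimal_swaps_from_to minimal_swaps_from_to_alt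
  rw [pvPermA_eq_canon, pvPermB_eq_canon]
  exact pvPhase2 (pvCanon_OK src dst hP)

-- ===== VERDICT (by name: the statement is the Claim_ definition above) =====
theorem minimal_swaps_from_to_spec : Claim_equal_minimal_swaps_from_to := by
  intro src dst _hd hp
  exact pv_main src dst hp
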